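-- pv_equiv track=rewrite | github.com/the-akira/PythonExperimentos | Algoritmos e Scripts/elementos_nao_repetidos.py | nao_repetidos
-- ===== SOURCE A (Python) =====
-- def nao_repetidos(string):
-- 	string = string.replace(' ','').lower()
--
-- 	contador = {}
--
-- 	for caracter in string:
-- 		if caracter in contador:
-- 			contador[caracter] += 1
--
-- 		else:
-- 			contador[caracter] = 1
--
-- 	todos_unicos = []
-- 	y = sorted(contador.items(), key=lambda x: x[1], reverse=True)
--
-- 	for item in y:
-- 		if item[1] == y[0][1]:
-- 			todos_unicos.append(item)
--
-- 	return todos_unicos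
-- ===== SOURCE B (Python) =====
-- def nao_repetidos(string):
--     string = string.replace(' ', '').lower()
--     contador = {}
--     m = 0
--     for caracter in string:
--         n = contador.get(caracter, 0) + 1
--         contador[caracter] = n
--         if n > m:
--             m = n
--     return [item for item in contador.items() if item[1] == m]
-- ===== Notes on version B (the rewrite author's own statement) =====
-- stated objective: simpler
-- what changed: B drops A's sort of the frequency items entirely: it tracks the running maximum count inside the single counting loop and then filters the dict items (insertion order) for that maximum, returning the same tied-for-max list A gets from its stable descending sort.
import Mathlib
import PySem

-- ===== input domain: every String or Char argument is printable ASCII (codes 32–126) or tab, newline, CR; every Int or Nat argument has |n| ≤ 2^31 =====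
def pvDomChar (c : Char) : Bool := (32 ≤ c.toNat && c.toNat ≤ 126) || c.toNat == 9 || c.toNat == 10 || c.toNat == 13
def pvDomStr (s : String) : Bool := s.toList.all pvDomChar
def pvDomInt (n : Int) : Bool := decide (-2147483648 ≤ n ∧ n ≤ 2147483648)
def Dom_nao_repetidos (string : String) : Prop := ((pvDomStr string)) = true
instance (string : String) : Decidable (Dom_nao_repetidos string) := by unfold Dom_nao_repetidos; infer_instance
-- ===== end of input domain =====

-- B avoids A's sort: it tracks the maximum count while counting and filters the dict items for it (same output; objective: simpler).

-- ===== PORT A =====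
-- Literal port of A: count into a dict, sort items by count descending (stable), keep items tied with y[0].
-- y[0] is written with pyGetD; its default is never used because the loop body runs only when y is nonempty.
def nao_repetidos (string : String) : List (String × Int) :=
  let s := PySem.Str.lower (PySem.Str.replace string " " "")
  let contador := (s.toList.map (fun c => String.ofList [c])).foldl
    (fun d caracter =>
      if d.contains caracter then d.modify caracter 0 (· + 1)
      else d.insert caracter 1) PySem.Dict.empty
  let y := PySem.List.sorted contador.items (fun x => x.2) true
  y.foldl (fun todos_unicos item =>
    if item.2 == (PySem.List.pyGetD y 0 ("", 0)).2 then todos_unicos ++ [item]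
    else todos_unicos) []

-- ===== PORT B =====
def nao_repetidos_alt (string : String) : List (String × Int) :=
  let s := PySem.Str.lower (PySem.Str.replace string " " "")
  let st := (s.toList.map (fun c => String.ofList [c])).foldl
    (fun st caracter =>
      let n := st.1.getD caracter 0 + 1
      (st.1.insert caracter n, if n > st.2 then n else st.2))
    (PySem.Dict.empty, (0 : Int))
  st.1.items.filter (fun item => item.2 == st.2)

-- ===== PRECONDITION & SPEC =====
def Spec_nao_repetidos (string : String) (out : List (String × Int)) : Prop := out = nao_repetidos_alt string
instance (string : String) (out : List (String × Int)) : Decidable (Spec_nao_repetidos string out) := by unfold Spec_nao_repetidos; infer_instance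

-- ===== CLAIM (what is proved, stated in full; the proofs are below) =====
def Claim_equal_nao_repetidos : Prop := ∀ (string : String), Dom_nao_repetidos string → Spec_nao_repetidos string (nao_repetidos string)

-- ===== LEMMAS AND PROOFS =====

-- A's dict-update step equals B's unconditional overwrite step.
lemma stepA_eq_insert (d : PySem.Dict String Int) (k : String) :
    (if d.contains k then d.modify k 0 (· + 1) else d.insert k 1)
      = d.insert k (d.getD k 0 + 1) := by
  by_cases h : d.contains k = true
  · simp [h, PySem.Dict.modify]
  · have h' : d.contains k = false := by simpa using h
    have : d.getD k 0 = 0 := by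
      simp [PySem.Dict.getD, (PySem.Dict.get?_eq_none_iff_contains d k).mpr h']
    simp [h', this]

-- Combined invariant of B's counting loop: its dict equals A's dict, keys stay nodup,
-- every stored count is ≤ the running max, and the max is 0 on the empty dict or attained by some item.
lemma count_loop_inv (ks : List String) : ∀ (d : PySem.Dict String Int) (m : Int),
    d.keys.Nodup → (∀ p ∈ d.items, p.2 ≤ m) →
    ((d.items = [] ∧ m = 0) ∨ ∃ q ∈ d.items, q.2 = m) →
    (ks.foldl (fun st caracter =>
        (st.1.insert caracter (st.1.getD caracter 0 + 1),
          if st.1.getD caracter 0 + 1 > st.2 then st.1.getD caracter 0 + 1 else st.2)) (d, m)).1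
      = ks.foldl (fun d caracter =>
          if d.contains caracter then d.modify caracter 0 (· + 1)
          else d.insert caracter 1) d
    ∧ (ks.foldl (fun st caracter =>
        (st.1.insert caracter (st.1.getD caracter 0 + 1),
          if st.1.getD caracter 0 + 1 > st.2 then st.1.getD caracter 0 + 1 else st.2)) (d, m)).1.keys.Nodup
    ∧ (∀ p ∈ (ks.foldl (fun st caracter =>
        (st.1.insert caracter (st.1.getD caracter 0 + 1),
          if st.1.getD caracter 0 + 1 > st.2 then st.1.getD caracter 0 + 1 else st.2)) (d, m)).1.items,
          p.2 ≤ (ks.foldl (fun st caracter =>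
            (st.1.insert caracter (st.1.getD caracter 0 + 1),
              if st.1.getD caracter 0 + 1 > st.2 then st.1.getD caracter 0 + 1 else st.2)) (d, m)).2)
    ∧ (((ks.foldl (fun st caracter =>
          (st.1.insert caracter (st.1.getD caracter 0 + 1),
            if st.1.getD caracter 0 + 1 > st.2 then st.1.getD caracter 0 + 1 else st.2)) (d, m)).1.items = []
        ∧ (ks.foldl (fun st caracter =>
          (st.1.insert caracter (st.1.getD caracter 0 + 1),
            if st.1.getD caracter 0 + 1 > st.2 then st.1.getD caracter 0 + 1 else st.2)) (d, m)).2 = 0)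
       ∨ ∃ q ∈ (ks.foldl (fun st caracter =>
          (st.1.insert caracter (st.1.getD caracter 0 + 1),
            if st.1.getD caracter 0 + 1 > st.2 then st.1.getD caracter 0 + 1 else st.2)) (d, m)).1.items,
            q.2 = (ks.foldl (fun st caracter =>
              (st.1.insert caracter (st.1.getD caracter 0 + 1),
                if st.1.getD caracter 0 + 1 > st.2 then st.1.getD caracter 0 + 1 else st.2)) (d, m)).2) := by
  induction ks with
  | nil => intro d m hnd hb hw; exact ⟨rfl, hnd, hb, hw⟩
  | cons k ks ih =>
    intro d m hnd hb hw
    simp only [List.foldl_cons]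
    rw [stepA_eq_insert]
    set n := d.getD k 0 + 1 with hn
    refine ih (d.insert k n) (if n > m then n else m) (PySem.Dict.nodup_keys_insert d k n hnd) ?_ ?_
    · intro p hp
      rcases (PySem.Dict.mem_items_insert d k n p).mp hp with h | ⟨h, _⟩
      · subst h; split <;> omega
      · have := hb p h; split <;> omega
    · by_cases hgt : n > m
      · exact Or.inr ⟨(k, n), PySem.Dict.mem_items_insert_self d k n, by simp [hgt]⟩
      · rcases hw with ⟨hi, hm⟩ | ⟨q, hq, hqm⟩
        · -- d has no items, so getD k 0 = 0 and n = 1 > 0 = m: contradiction with ¬ n > m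
          exfalso
          have hk : d.contains k = false := by
            by_contra hc
            have : k ∈ d.keys := (PySem.Dict.contains_iff_mem_keys d k).mp (by simpa using hc)
            simp [PySem.Dict.keys, hi] at this
          have : d.getD k 0 = 0 := by
            simp [PySem.Dict.getD, (PySem.Dict.get?_eq_none_iff_contains d k).mpr hk]
          omega
        · -- the old witness has a key ≠ k (else its count would exceed m), so it survives the insert
          have hqk : q.1 ≠ k := by
            intro hkeq
            have : d.getD q.1 0 = q.2 := by
              have : (q.1, q.2) ∈ d.items := by simpa using hq
              exact PySem.Dict.getD_of_mem_items d this hnd 0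
            rw [hkeq] at this; omega
          refine Or.inr ⟨q, (PySem.Dict.mem_items_insert d k n q).mpr (Or.inr ⟨hq, hqk⟩), ?_⟩
          simp [hgt, hqm]

-- Inserting an element whose count is below the maximum does not change the max-filter.
lemma filter_insertBy_not (bf : String × Int → String × Int → Bool) (p : String × Int → Bool)
    (x : String × Int) (ys : List (String × Int)) (hx : p x = false) :
    (PySem.List.insertBy bf x ys).filter p = ys.filter p := by
  induction ys with
  | nil => simp [PySem.List.insertBy, hx]
  | cons y ys ih =>
    simp only [PySem.List.insertBy]
    split
    · simp [hx]
    · simp only [List.filter_cons]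
      split <;> simp [ih]

-- Inserting an element attaining the maximum appends it to the max-filter of a desc-sorted, bounded list.
lemma filter_insertBy_max (M : Int) (x : String × Int) (ys : List (String × Int))
    (hx : x.2 = M) (hb : ∀ y ∈ ys, y.2 ≤ M)
    (hpw : ys.Pairwise (fun a b => b.2 ≤ a.2)) :
    (PySem.List.insertBy (fun a b => decide (b.2 < a.2)) x ys).filter (fun y => y.2 == M)
      = ys.filter (fun y => y.2 == M) ++ [x] := by
  induction ys with
  | nil => simp [PySem.List.insertBy, hx]
  | cons y ys ih =>
    simp only [PySem.List.insertBy]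
    rcases List.pairwise_cons.mp hpw with ⟨hy, hpw'⟩
    by_cases hlt : y.2 < x.2
    · rw [if_pos (by simpa using hlt)]
      have htail : ∀ z ∈ ys, ¬ (z.2 = M) := by
        intro z hz; have := hy z hz; omega
      rw [List.filter_cons_of_pos (by simp [hx]), List.filter_cons_of_neg (by simp; omega)]
      rw [List.filter_eq_nil_iff.mpr (by intro z hz; simpa using htail z hz)]
      simp
    · rw [if_neg (by simpa using hlt)]
      have hyM : y.2 = M := by have := hb y (by simp); omega
      rw [List.filter_cons_of_pos (by simp [hyM]), List.filter_cons_of_pos (by simp [hyM])]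
      rw [ih (fun z hz => hb z (by simp [hz])) hpw']
      simp

-- insertBy preserves descending pairwise order.
lemma pairwise_insertBy (x : String × Int) (ys : List (String × Int))
    (h : ys.Pairwise (fun a b => b.2 ≤ a.2)) :
    (PySem.List.insertBy (fun a b => decide (b.2 < a.2)) x ys).Pairwise (fun a b => b.2 ≤ a.2) := by
  induction ys with
  | nil => simp [PySem.List.insertBy]
  | cons y ys ih =>
    rcases List.pairwise_cons.mp h with ⟨hy, hpw'⟩
    simp only [PySem.List.insertBy]
    by_cases hlt : y.2 < x.2
    · rw [if_pos (by simpa using hlt)]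
      refine List.pairwise_cons.mpr ⟨?_, h⟩
      intro z hz
      rcases List.mem_cons.mp hz with hz | hz
      · subst hz; omega
      · have := hy z hz; omega
    · rw [if_neg (by simpa using hlt)]
      refine List.pairwise_cons.mpr ⟨?_, ih hpw'⟩
      intro z hz
      rcases (PySem.List.mem_insertBy _ x z ys).mp hz with hz | hz
      · subst hz; omega
      · exact hy z hz

-- Invariant of the insertion-sort fold: result is desc-sorted, its members come from l,
-- and its max-filter equals l's max-filter.
lemma sortfold_inv (M : Int) (l : List (String × Int)) (hb : ∀ x ∈ l, x.2 ≤ M) :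
    (l.foldl (fun acc x => PySem.List.insertBy (fun a b => decide (b.2 < a.2)) x acc) []).Pairwise
        (fun a b => b.2 ≤ a.2)
    ∧ (∀ p ∈ l.foldl (fun acc x => PySem.List.insertBy (fun a b => decide (b.2 < a.2)) x acc) [], p ∈ l)
    ∧ (l.foldl (fun acc x => PySem.List.insertBy (fun a b => decide (b.2 < a.2)) x acc) []).filter
          (fun y => y.2 == M)
        = l.filter (fun y => y.2 == M) := by
  induction l using List.reverseRecOn with
  | nil => simp
  | append_singleton l x ih =>
    have hb' : ∀ z ∈ l, z.2 ≤ M := fun z hz => hb z (by simp [hz])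
    rcases ih hb' with ⟨hpw, hmem, hfil⟩
    rw [List.foldl_append]
    simp only [List.foldl_cons, List.foldl_nil]
    refine ⟨pairwise_insertBy x _ hpw, ?_, ?_⟩
    · intro p hp
      rcases (PySem.List.mem_insertBy _ x p _).mp hp with hp | hp
      · simp [hp]
      · have := hmem p hp; simp [this]
    · by_cases hxM : x.2 = M
      · rw [filter_insertBy_max M x _ hxM (fun y hy => hb' y (hmem y hy)) hpw, hfil]
        simp [List.filter_append, hxM]
      · rw [filter_insertBy_not _ _ x _ (by simpa using hxM), hfil]
        simp [List.filter_append, hxM]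

-- A's sort-then-take-ties pass, applied to any item list bounded by and attaining m, is the max-filter.
lemma assemble (l : List (String × Int)) (m : Int)
    (hbound : ∀ p ∈ l, p.2 ≤ m) (hwit : l = [] ∨ ∃ q ∈ l, q.2 = m) :
    (PySem.List.sorted l (fun x => x.2) true).foldl
      (fun acc item =>
        if item.2 == (PySem.List.pyGetD (PySem.List.sorted l (fun x => x.2) true) 0 ("", 0)).2
        then acc ++ [item] else acc) []
      = l.filter (fun p => p.2 == m) := by
  have hsorted : PySem.List.sorted l (fun x => x.2) true
      = l.foldl (fun acc x => PySem.List.insertBy (fun a b => decide (b.2 < a.2)) x acc) [] :=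
    PySem.List.sorted_rev_eq_foldl_insertBy l (fun x => x.2)
  rw [hsorted, PySem.List.foldl_append_if_eq_filter]
  obtain ⟨hpw, hmem, hfil⟩ := sortfold_inv m l hbound
  rcases hwit with hl | ⟨q, hq, hqm⟩
  · subst hl; rfl
  · set y := l.foldl (fun acc x => PySem.List.insertBy (fun a b => decide (b.2 < a.2)) x acc) []
      with hy
    obtain ⟨h, t, hht⟩ : ∃ h t, y = h :: t := by
      cases hcy : y with
      | nil =>
        exfalso
        have hqf : q ∈ y.filter (fun p => p.2 == m) := by
          rw [hfil]; exact List.mem_filter.mpr ⟨hq, by simp [hqm]⟩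
        rw [hcy] at hqf; simp at hqf
      | cons a b => exact ⟨a, b, rfl⟩
    have hget : PySem.List.pyGetD y 0 ("", 0) = h := by
      rw [hht]; simp [PySem.List.pyGetD, PySem.List.pyGet?, PySem.List.pyIdx?]
    have hh2 : h.2 = m := by
      have hhm : h ∈ l := hmem h (by rw [hht]; simp)
      have h1 : h.2 ≤ m := hbound h hhm
      have hqy : q ∈ y := by
        have : q ∈ y.filter (fun p => p.2 == m) := by
          rw [hfil]; exact List.mem_filter.mpr ⟨hq, by simp [hqm]⟩
        exact (List.mem_filter.mp this).1
      rw [hht] at hqy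
      rcases List.mem_cons.mp hqy with hqy | hqy
      · rw [hqy] at hqm; omega
      · have := (List.pairwise_cons.mp (hht ▸ hpw)).1 q hqy
        omega
    rw [hget, hh2]
    exact hfil

-- The two ports agree on every string.
lemma main_eq (string : String) : nao_repetidos string = nao_repetidos_alt string := by
  simp only [nao_repetidos, nao_repetidos_alt]
  obtain ⟨hdict, _hnd, hbound, hwit⟩ :=
    count_loop_inv ((PySem.Str.lower (PySem.Str.replace string " " "")).toList.map
        (fun c => String.ofList [c]))
      PySem.Dict.empty 0 (by simp) (by intro p hp; simp [PySem.Dict.empty] at hp)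
      (Or.inl ⟨rfl, rfl⟩)
  rw [← hdict]
  exact assemble _ _ hbound (hwit.imp And.left id)

-- ===== VERDICT (by name: the statement is the Claim_ definition above) =====
theorem nao_repetidos_spec : Claim_equal_nao_repetidos := by
  intro string _
  exact main_eq string
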